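-- pv_equiv track=rewrite | github.com/stijn-dejongh/spec-kitty | src/charter/compact.py | _extract_markdown_heading
-- ===== SOURCE A (Python) =====
-- def _extract_markdown_heading(line: str) -> str | None:
--     """Return heading text from an ATX Markdown heading line."""
--     stripped = line.strip()
--     if not stripped.startswith("#"):
--         return None
--
--     level = 0
--     while level < len(stripped) and stripped[level] == "#":
--         level += 1
--     if level == 0 or level > 6:
--         return None
--     if level == len(stripped) or stripped[level] != " ":
--         return None
--
--     anchor = stripped[level + 1 :].strip()
--     return anchor or None
-- ===== SOURCE B (Python) =====
-- def _extract_markdown_heading(line: str) -> str | None: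
--     """Return heading text from an ATX Markdown heading line."""
--     stripped = line.strip()
--     for level in range(1, 7):
--         prefix = "#" * level + " "
--         if stripped.startswith(prefix):
--             return stripped[len(prefix):].strip() or None
--     return None
-- ===== Notes on version B (the rewrite author's own statement) =====
-- stated objective: idiomatic
-- what changed: Instead of counting leading hash characters with an index loop and validating the count with a chain of guards, B matches the stripped line against the six literal candidate heading prefixes (k hashes followed by one space, k = 1..6); exactly one can match, which encodes the level limit, the rejection of longer hash runs and the required space in the pattern itself.
import Mathlib
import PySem

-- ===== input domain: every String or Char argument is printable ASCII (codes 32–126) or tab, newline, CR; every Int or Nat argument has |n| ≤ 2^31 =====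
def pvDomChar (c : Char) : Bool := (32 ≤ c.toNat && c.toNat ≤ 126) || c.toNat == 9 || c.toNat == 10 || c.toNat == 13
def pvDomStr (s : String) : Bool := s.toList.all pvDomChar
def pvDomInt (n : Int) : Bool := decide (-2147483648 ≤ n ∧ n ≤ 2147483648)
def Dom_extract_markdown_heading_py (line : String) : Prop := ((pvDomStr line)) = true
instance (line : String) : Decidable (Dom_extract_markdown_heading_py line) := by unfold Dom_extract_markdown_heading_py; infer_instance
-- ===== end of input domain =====

-- B replaces A's hash-counting index loop and guard chain by matching the stripped line
-- against the six literal candidate prefixes "# " … "###### " (objective: idiomatic; same cost).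

-- ===== PORT A =====
-- A's while loop 'while level < len(stripped) and stripped[level] == "#": level += 1'
-- counts the leading '#' characters; rendered as the obvious structural recursion.
def pvHashLevel : List Char → Nat
  | [] => 0
  | c :: rest => if c = '#' then pvHashLevel rest + 1 else 0

def extract_markdown_heading_py (line : String) : Option String :=
  let stripped := (PySem.Str.strip line).toList
  if ¬ (PySem.Chars.startswith stripped ['#']) then none
  else
    let level := pvHashLevel stripped
    if level = 0 ∨ level > 6 then none
    else if level = stripped.length ∨ PySem.List.pyGet? stripped (level : Int) ≠ some ' ' then none
    else
      let anchor := PySem.Chars.strip (PySem.List.slice stripped (some ((level : Int) + 1)) none)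
      if anchor = [] then none else some (String.ofList anchor)

-- ===== PORT B =====
-- B's 'for level in range(1, 7): … if stripped.startswith(prefix): return …' loop,
-- rendered as structural recursion over range(1,7); '"#" * level + " "' is
-- List.replicate level '#' ++ [' '], and 'stripped[len(prefix):]' (nonnegative slice) is drop.
def pvTryLevels (s : List Char) : List Int → Option String
  | [] => none
  | lv :: rest =>
    let pre := List.replicate lv.toNat '#' ++ [' ']
    if PySem.Chars.startswith s pre then
      let anchor := PySem.Chars.strip (s.drop pre.length)
      if anchor = [] then none else some (String.ofList anchor)
    else pvTryLevels s rest

def extract_markdown_heading_py_alt (line : String) : Option String :=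
  let stripped := (PySem.Str.strip line).toList
  pvTryLevels stripped (PySem.List.pyRange 1 7 1)

-- ===== PRECONDITION & SPEC =====
def Spec_extract_markdown_heading_py (line : String) (out : Option String) : Prop := out = extract_markdown_heading_py_alt line
instance (line : String) (out : Option String) : Decidable (Spec_extract_markdown_heading_py line out) := by unfold Spec_extract_markdown_heading_py; infer_instance

-- ===== CLAIM (what is proved, stated in full; the proofs are below) =====
def Claim_equal_extract_markdown_heading_py : Prop := ∀ (line : String), Dom_extract_markdown_heading_py line → Spec_extract_markdown_heading_py line (extract_markdown_heading_py line)

-- ===== LEMMAS AND PROOFS =====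

-- A's counting loop computes the length of the leading run of '#'
theorem pvHashLevel_eq_takeWhile (s : List Char) :
    pvHashLevel s = (s.takeWhile (· == '#')).length := by
  induction s with
  | nil => rfl
  | cons c rest ih =>
    by_cases h : c = '#' <;> simp [pvHashLevel, h, ih]

-- matching the prefix "#"^lv ++ " " is exactly: the leading hash run has length lv
-- and the character after it is a space
theorem pv_sw_eq (lv : Nat) (s : List Char) :
    PySem.Chars.startswith s (List.replicate lv '#' ++ [' ']) =
      (decide ((s.takeWhile (· == '#')).length = lv) && (s[lv]? == some ' ')) := by
  induction lv generalizing s with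
  | zero =>
    cases s with
    | nil => rw [Bool.eq_iff_iff]; simp [PySem.Chars.startswith_iff]
    | cons c t =>
      rw [Bool.eq_iff_iff]
      by_cases h : c = '#'
      · simp [PySem.Chars.startswith_iff, List.prefix_cons_iff, h]
      · by_cases hs : c = ' '
        · simp [PySem.Chars.startswith_iff, List.prefix_cons_iff, hs]
        · simp [PySem.Chars.startswith_iff, List.prefix_cons_iff, h, hs, Ne.symm hs]
  | succ lv ih =>
    cases s with
    | nil => rw [Bool.eq_iff_iff]; simp [PySem.Chars.startswith_iff]
    | cons c t =>
      rw [List.replicate_succ, Bool.eq_iff_iff, List.cons_append,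
        PySem.Chars.startswith_iff, List.prefix_cons_iff]
      by_cases h : c = '#'
      · have iht := ih t
        rw [Bool.eq_iff_iff, PySem.Chars.startswith_iff] at iht
        simp [h, ← iht]
      · simp [h, Ne.symm h]

-- evaluation of B's level loop: it succeeds exactly when the hash run length L is
-- 1..6 and a space follows, and then returns the stripped remainder after L+1 chars
theorem pvTryLevels_eval (s : List Char) :
    pvTryLevels s (PySem.List.pyRange 1 7 1) =
      (let L := (s.takeWhile (· == '#')).length
       if 1 ≤ L ∧ L ≤ 6 ∧ s[L]? = some ' ' then
         (let anchor := PySem.Chars.strip (s.drop (L + 1))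
          if anchor = [] then none else some (String.ofList anchor))
       else none) := by
  have hr : PySem.List.pyRange 1 7 1 = [1, 2, 3, 4, 5, 6] := by decide
  rw [hr]
  simp only [pvTryLevels, pv_sw_eq]
  obtain ⟨L, hLdef⟩ : ∃ L, (s.takeWhile (· == '#')).length = L := ⟨_, rfl⟩
  simp only [hLdef]
  by_cases hsp : s[L]? = some ' '
  · have hcond : ∀ lv : ℕ, (decide (L = lv) && (s[lv]? == some ' ')) = decide (L = lv) := by
      intro lv
      by_cases h : L = lv
      · subst h; simp [hsp]
      · simp [h]
    simp only [show ∀ lv : Int, ((decide (L = lv.toNat) && (s[lv.toNat]? == some ' '))) =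
        decide (L = lv.toNat) from fun lv => hcond lv.toNat]
    by_cases h16 : 1 ≤ L ∧ L ≤ 6
    · obtain ⟨h1, h6⟩ := h16
      interval_cases L <;> simp [hsp]
    · have hne : ∀ k : ℕ, 1 ≤ k → k ≤ 6 → L ≠ k := by
        intro k hk1 hk6 hEq; exact h16 ⟨by omega, by omega⟩
      have h16' : ¬ (1 ≤ L ∧ L ≤ 6 ∧ s[L]? = some ' ') := by
        intro ⟨a, b, _⟩; exact h16 ⟨a, b⟩
      simp [hne 1 (by omega) (by omega), hne 2 (by omega) (by omega),
        hne 3 (by omega) (by omega), hne 4 (by omega) (by omega),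
        hne 5 (by omega) (by omega), hne 6 (by omega) (by omega), h16']
  · have hall : ∀ lv : ℕ, (decide (L = lv) && (s[lv]? == some ' ')) = false := by
      intro lv
      by_cases h : L = lv
      · subst h; simp [hsp]
      · simp [h]
    have hrhs : ¬ (1 ≤ L ∧ L ≤ 6 ∧ s[L]? = some ' ') := by
      intro ⟨_, _, h⟩; exact hsp h
    simp only [show ∀ lv : Int, ((decide (L = lv.toNat) && (s[lv.toNat]? == some ' '))) =
        false from fun lv => hall lv.toNat]
    simp [hrhs]

theorem pv_startswith_singleton (s : List Char) (c : Char) :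
    PySem.Chars.startswith s [c] = true ↔ s.head? = some c := by
  rw [PySem.Chars.startswith_iff]
  cases s with
  | nil => simp
  | cons a t => simp [List.prefix_cons_iff, eq_comm]

-- A's guard chain evaluates to the same characterization
theorem pvA_eval (s : List Char) :
    (if ¬ (PySem.Chars.startswith s ['#']) then none
     else
       let level := pvHashLevel s
       if level = 0 ∨ level > 6 then none
       else if level = s.length ∨ PySem.List.pyGet? s (level : Int) ≠ some ' ' then none
       else
         let anchor := PySem.Chars.strip (PySem.List.slice s (some ((level : Int) + 1)) none)
         if anchor = [] then none else some (String.ofList anchor)) =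
      (let L := (s.takeWhile (· == '#')).length
       if 1 ≤ L ∧ L ≤ 6 ∧ s[L]? = some ' ' then
         (let anchor := PySem.Chars.strip (s.drop (L + 1))
          if anchor = [] then none else some (String.ofList anchor))
       else none) := by
  simp only
  obtain ⟨L, hLdef⟩ : ∃ L, pvHashLevel s = L := ⟨_, rfl⟩
  have hLtw : (s.takeWhile (· == '#')).length = L := by
    rw [← hLdef, pvHashLevel_eq_takeWhile]
  have hLle : L ≤ s.length := by
    rw [← hLtw]; exact (List.takeWhile_prefix _).length_le
  have hget : PySem.List.pyGet? s (L : Int) = s[L]? := PySem.List.pyGet?_natCast s L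
  have hstartL : PySem.Chars.startswith s ['#'] = true ↔ 1 ≤ L := by
    rw [pv_startswith_singleton]
    cases s with
    | nil => simp [← hLdef, pvHashLevel]
    | cons a t =>
      by_cases h : a = '#' <;> simp [← hLdef, pvHashLevel, h]
  rw [hLdef, hLtw]
  by_cases hstart : PySem.Chars.startswith s ['#'] = true
  · have h1 : 1 ≤ L := hstartL.mp hstart
    simp only [hstart, not_true_eq_false, if_false]
    by_cases h6 : L > 6
    · rw [if_pos (Or.inr h6), if_neg (by rintro ⟨_, h2, _⟩; omega)]
    · rw [if_neg (show ¬ (L = 0 ∨ L > 6) by omega)]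
      by_cases hsp : s[L]? = some ' '
      · have hne : L ≠ s.length := by
          intro hEq
          rw [hEq] at hsp
          simp at hsp
        rw [if_neg (by
          rintro (h | h)
          · exact hne h
          · exact h (hget.trans hsp))]
        rw [if_pos (show 1 ≤ L ∧ L ≤ 6 ∧ s[L]? = some ' ' from ⟨h1, by omega, hsp⟩)]
        rw [PySem.List.slice_from s (a := (L : Int) + 1) (by omega),
          show ((L : Int) + 1).toNat = L + 1 by omega]
      · rw [if_pos (Or.inr (fun h => hsp (hget.symm.trans h))),
          if_neg (by rintro ⟨_, _, h⟩; exact hsp h)]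
  · have h0 : ¬ 1 ≤ L := fun h => hstart (hstartL.mpr h)
    simp only [hstart]
    rw [if_pos (show L = 0 ∨ L > 6 from Or.inl (by omega)),
      if_neg (show ¬ (1 ≤ L ∧ L ≤ 6 ∧ s[L]? = some ' ') from fun h => h0 h.1)]
    simp

-- ===== VERDICT (by name: the statement is the Claim_ definition above) =====
theorem extract_markdown_heading_py_spec : Claim_equal_extract_markdown_heading_py := by
  intro line _
  unfold Spec_extract_markdown_heading_py extract_markdown_heading_py extract_markdown_heading_py_alt
  rw [pvTryLevels_eval]
  exact pvA_eval ((PySem.Str.strip line).toList)
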